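-- pv_equiv track=rewrite | github.com/Kaushikpatnaik/Calendly_LLM | openai_utils.py | _find_generated_answer
-- ===== SOURCE A (Python) =====
-- def _find_generated_answer(tokens, newline="\n" ):
--     """LMs tend to insert initial newline characters before
--     they begin generating text. This function ensures that we
--     properly capture the true first line as the answer while
--     also ensuring that token probabilities are aligned."""
--     answer_token_indices = []
--     char_seen = False
--     for i, tok in enumerate(tokens):
--         # This is the main condition: a newline that isn't an initial
--         # string of newlines:
--         if tok == newline and char_seen:
--             break
--         # Keep the initial newlines for consistency:
--         elif tok == newline and not char_seen:
--             answer_token_indices.append(i)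
--         # Proper tokens:
--         elif tok != newline:
--             char_seen = True
--             answer_token_indices.append(i)
--     return answer_token_indices
-- ===== SOURCE B (Python) =====
-- def _find_generated_answer(tokens, newline="\n"):
--     n = len(tokens)
--     first_char = next((i for i, t in enumerate(tokens) if t != newline), None)
--     if first_char is None:
--         return list(range(n))
--     cut = next((i for i in range(first_char, n) if tokens[i] == newline), n)
--     return list(range(cut))
-- ===== Notes on version B (the rewrite author's own statement) =====
-- stated objective: simpler
-- what changed: Replaces the flag-driven per-token conditional-append loop with a boundary computation: find the first non-newline token, then the first newline at or after it, and return the prefix range up to that cut.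
import Mathlib
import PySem

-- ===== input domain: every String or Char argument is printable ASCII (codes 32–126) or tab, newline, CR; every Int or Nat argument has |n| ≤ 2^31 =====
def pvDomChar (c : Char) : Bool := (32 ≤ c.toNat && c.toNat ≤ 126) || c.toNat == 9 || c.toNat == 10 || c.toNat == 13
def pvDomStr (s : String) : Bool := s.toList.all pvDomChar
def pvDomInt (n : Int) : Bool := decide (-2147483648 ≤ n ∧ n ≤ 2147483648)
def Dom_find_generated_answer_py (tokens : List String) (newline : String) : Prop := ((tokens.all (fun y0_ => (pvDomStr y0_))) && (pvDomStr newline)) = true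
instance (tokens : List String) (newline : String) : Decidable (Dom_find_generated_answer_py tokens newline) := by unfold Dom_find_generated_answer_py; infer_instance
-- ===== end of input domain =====

-- B replaces A's flag-driven conditional-append loop by computing the cut boundary
-- (first newline after the first non-newline token) and returning the prefix range; objective: simpler.

-- ===== PORT A =====
-- the for-loop of A: current index i, char_seen flag, emitting indices in order
def pvALoop (newline : String) : List String → Int → Bool → List Int
  | [], _, _ => []
  | tok :: rest, i, char_seen =>
    if tok == newline && char_seen then []
    else if tok == newline && !char_seen then i :: pvALoop newline rest (i + 1) char_seen
    else i :: pvALoop newline rest (i + 1) true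

def find_generated_answer_py (tokens : List String) (newline : String) : List Int :=
  pvALoop newline tokens 0 false

-- ===== PORT B =====
def find_generated_answer_py_alt (tokens : List String) (newline : String) : List Int :=
  let n := tokens.length
  match tokens.findIdx? (fun t => t != newline) with
  | none => (List.range n).map Int.ofNat
  | some fc =>
      let cut := match (tokens.drop fc).findIdx? (fun t => t == newline) with
        | none => n
        | some j => fc + j
      (List.range cut).map Int.ofNat

-- ===== PRECONDITION & SPEC =====
def Spec_find_generated_answer_py (tokens : List String) (newline : String) (out : List Int) : Prop := out = find_generated_answer_py_alt tokens newline
instance (tokens : List String) (newline : String) (out : List Int) : Decidable (Spec_find_generated_answer_py tokens newline out) := by unfold Spec_find_generated_answer_py; infer_instance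

-- ===== CLAIM (what is proved, stated in full; the proofs are below) =====
def Claim_equal_find_generated_answer_py : Prop := ∀ (tokens : List String) (newline : String), Dom_find_generated_answer_py tokens newline → Spec_find_generated_answer_py tokens newline (find_generated_answer_py tokens newline)

-- ===== LEMMAS AND PROOFS =====

-- the cut B computes, as a plain function
def pvCut (newline : String) (tokens : List String) : Nat :=
  match tokens.findIdx? (fun t => t != newline) with
  | none => tokens.length
  | some fc =>
      match (tokens.drop fc).findIdx? (fun t => t == newline) with
      | none => tokens.length
      | some j => fc + j

-- index of the first newline (or length), used for the char_seen = true phase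
def pvNlIdx (newline : String) (tokens : List String) : Nat :=
  (tokens.findIdx? (fun t => t == newline)).getD tokens.length

lemma pvCut_cons_nl (newline : String) (rest : List String) :
    pvCut newline (newline :: rest) = pvCut newline rest + 1 := by
  simp only [pvCut, List.findIdx?_cons, bne_self_eq_false, Bool.false_eq_true, if_false]
  cases h : rest.findIdx? (fun t => t != newline) with
  | none => simp
  | some fc =>
      simp only [Option.map_some, List.length_cons, List.drop_succ_cons]
      cases h2 : (rest.drop fc).findIdx? (fun t => t == newline) with
      | none => simp
      | some j => simp; omega

lemma pvCut_cons_char (newline : String) (t : String) (rest : List String) (ht : t ≠ newline) :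
    pvCut newline (t :: rest) = pvNlIdx newline rest + 1 := by
  have hb : (t != newline) = true := by simpa using ht
  have hbe : (t == newline) = false := by simpa using ht
  simp only [pvCut, pvNlIdx, List.findIdx?_cons, hb, if_true, List.drop_zero, hbe,
    Bool.false_eq_true, if_false]
  cases h2 : rest.findIdx? (fun t => t == newline) with
  | none => simp
  | some j => simp

lemma pvShift (i : Int) (m : Nat) :
    i :: (List.range m).map (fun k => (i + 1) + Int.ofNat k)
      = (List.range (m + 1)).map (fun k => i + Int.ofNat k) := by
  rw [List.range_succ_eq_map, List.map_cons, List.map_map]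
  congr 1
  · simp
  · apply List.map_congr_left
    intro k _
    simp [Function.comp, Int.ofNat_eq_natCast, Nat.succ_eq_add_one]
    ring

lemma pvALoop_true (newline : String) (tokens : List String) (i : Int) :
    pvALoop newline tokens i true
      = (List.range (pvNlIdx newline tokens)).map (fun k => i + Int.ofNat k) := by
  induction tokens generalizing i with
  | nil => simp [pvALoop, pvNlIdx]
  | cons t rest ih =>
      by_cases h : t = newline
      · subst h
        simp [pvALoop, pvNlIdx, List.findIdx?_cons]
      · have hb : (t == newline) = false := by simpa using h
        simp only [pvALoop, hb, Bool.false_and, Bool.false_eq_true, if_false]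
        rw [ih, pvShift]
        simp only [pvNlIdx, List.findIdx?_cons, hb, Bool.false_eq_true, if_false]
        cases h2 : rest.findIdx? (fun t => t == newline) with
        | none => simp
        | some j => simp

lemma pvALoop_false (newline : String) (tokens : List String) (i : Int) :
    pvALoop newline tokens i false
      = (List.range (pvCut newline tokens)).map (fun k => i + Int.ofNat k) := by
  induction tokens generalizing i with
  | nil => simp [pvALoop, pvCut]
  | cons t rest ih =>
      by_cases h : t = newline
      · subst h
        simp only [pvALoop, BEq.rfl, Bool.true_and, Bool.and_false, Bool.not_false,
          Bool.false_eq_true, if_false, if_true]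
        rw [ih, pvShift, pvCut_cons_nl]
      · have hb : (t == newline) = false := by simpa using h
        simp only [pvALoop, hb, Bool.false_and, Bool.false_eq_true, if_false]
        rw [pvALoop_true, pvShift, pvCut_cons_char newline t rest h]

lemma pvAlt_eq_cut (tokens : List String) (newline : String) :
    find_generated_answer_py_alt tokens newline
      = (List.range (pvCut newline tokens)).map Int.ofNat := by
  simp only [find_generated_answer_py_alt, pvCut]
  cases h : tokens.findIdx? (fun t => t != newline) with
  | none => rfl
  | some fc =>
      cases h2 : (tokens.drop fc).findIdx? (fun t => t == newline) <;> simp [h2]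

-- ===== VERDICT (by name: the statement is the Claim_ definition above) =====
theorem find_generated_answer_py_spec : Claim_equal_find_generated_answer_py := by
  intro tokens newline _
  unfold Spec_find_generated_answer_py find_generated_answer_py
  rw [pvALoop_false, pvAlt_eq_cut]
  apply List.map_congr_left
  intro k _
  simp
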